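-- pv_equiv track=rewrite | github.com/Hitman47/Emule_Docker | dashboard/server.py | _clean_amulecmd_output
-- ===== SOURCE A (Python) =====
-- def _clean_amulecmd_output(output):
--     """Remove amulecmd header lines, keep status lines (starting with >)."""
--     lines = output.split("\n")
--     clean = []
--     skip_header = True
--     for line in lines:
--         # Status lines always start with ">" — never skip them
--         if line.strip().startswith(">"):
--             skip_header = False
--             clean.append(line)
--             continue
--         # Skip header boilerplate
--         if skip_header:
--             stripped = line.strip()
--             if (not stripped
--                     or "This is amulecmd" in line
--                     or "Creating client" in line
--                     or "Succeeded!" in line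
--                     or "Connection established" in line
--                     or stripped == "---"):
--                 continue
--             # Any other non-empty line ends the header
--             skip_header = False
--         clean.append(line)
--     return "\n".join(clean).strip()
-- ===== SOURCE B (Python) =====
-- def _clean_amulecmd_output(output):
--     """Remove amulecmd header lines, keep status lines (starting with >)."""
--     lines = output.split("\n")
--     for i, line in enumerate(lines):
--         stripped = line.strip()
--         if stripped.startswith(">") or (
--                 stripped
--                 and "This is amulecmd" not in line
--                 and "Creating client" not in line
--                 and "Succeeded!" not in line
--                 and "Connection established" not in line
--                 and stripped != "---"):
--             return "\n".join(lines[i:]).strip()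
--     return ""
-- ===== Notes on version B (the rewrite author's own statement) =====
-- stated objective: simpler
-- what changed: Replaces the stateful skip_header flag and accumulator list with a single boundary search (first kept line) followed by one slice-and-join.
import Mathlib
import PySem

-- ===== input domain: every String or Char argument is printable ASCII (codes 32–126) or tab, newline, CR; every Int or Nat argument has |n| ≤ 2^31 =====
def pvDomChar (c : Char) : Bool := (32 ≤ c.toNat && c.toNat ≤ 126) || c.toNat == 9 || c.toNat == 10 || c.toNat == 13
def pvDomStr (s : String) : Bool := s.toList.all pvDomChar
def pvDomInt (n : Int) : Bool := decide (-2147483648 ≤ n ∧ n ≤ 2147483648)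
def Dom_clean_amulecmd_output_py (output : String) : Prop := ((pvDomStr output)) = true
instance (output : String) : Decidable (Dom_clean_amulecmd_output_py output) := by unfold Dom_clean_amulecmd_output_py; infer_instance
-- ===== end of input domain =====

-- B replaces A's stateful skip_header flag with a boundary search plus one slice (objective: simpler).

-- ===== PORT A =====
-- the loop: state (clean, skip_header), each line appended or skipped exactly as in A
def pvALoop : List String → List String → Bool → List String
  | [], clean, _ => clean
  | line :: rest, clean, skip =>
    if PySem.Str.startswith (PySem.Str.strip line) ">" then
      pvALoop rest (clean ++ [line]) false
    else if skip then
      let stripped := PySem.Str.strip line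
      if stripped = "" || PySem.Str.isIn "This is amulecmd" line
          || PySem.Str.isIn "Creating client" line
          || PySem.Str.isIn "Succeeded!" line
          || PySem.Str.isIn "Connection established" line
          || stripped = "---" then
        pvALoop rest clean skip
      else
        pvALoop rest (clean ++ [line]) false
    else
      pvALoop rest (clean ++ [line]) skip

def clean_amulecmd_output_py (output : String) : String :=
  PySem.Str.strip (PySem.Str.join "\n" (pvALoop (((PySem.Str.split? output "\n").getD [])) [] true))

-- ===== PORT B =====
-- is this line kept (ends the header)?
def pvKept (line : String) : Bool :=
  let stripped := PySem.Str.strip line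
  PySem.Str.startswith stripped ">" ||
    (!(stripped = "") &&
      !(PySem.Str.isIn "This is amulecmd" line) &&
      !(PySem.Str.isIn "Creating client" line) &&
      !(PySem.Str.isIn "Succeeded!" line) &&
      !(PySem.Str.isIn "Connection established" line) &&
      !(stripped = "---"))

-- find the first kept line; return the suffix lines[i:] from it (the enumerate loop of Source B)
def pvFindTail : List String → Option (List String)
  | [] => none
  | line :: rest => if pvKept line then some (line :: rest) else pvFindTail rest

def clean_amulecmd_output_py_alt (output : String) : String :=
  match pvFindTail (((PySem.Str.split? output "\n").getD [])) with
  | some tail => PySem.Str.strip (PySem.Str.join "\n" tail)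
  | none => ""

-- ===== PRECONDITION & SPEC =====
def Spec_clean_amulecmd_output_py (output : String) (out : String) : Prop := out = clean_amulecmd_output_py_alt output
instance (output : String) (out : String) : Decidable (Spec_clean_amulecmd_output_py output out) := by unfold Spec_clean_amulecmd_output_py; infer_instance

-- ===== CLAIM (what is proved, stated in full; the proofs are below) =====
def Claim_equal_clean_amulecmd_output_py : Prop := ∀ (output : String), Dom_clean_amulecmd_output_py output → Spec_clean_amulecmd_output_py output (clean_amulecmd_output_py output)

-- ===== LEMMAS AND PROOFS =====

-- once skip_header is false, A appends every remaining line
theorem pvALoop_false (lines : List String) : ∀ acc, pvALoop lines acc false = acc ++ lines := by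
  induction lines with
  | nil => intro acc; simp [pvALoop]
  | cons line rest ih =>
    intro acc
    unfold pvALoop
    split <;> simp [ih]

-- A's header loop from the initial state equals B's boundary search
theorem pvALoop_eq_findTail (lines : List String) :
    pvALoop lines [] true = (pvFindTail lines).getD [] := by
  induction lines with
  | nil => simp [pvALoop, pvFindTail]
  | cons line rest ih =>
    by_cases hs : PySem.Str.startswith (PySem.Str.strip line) ">" = true
    · simp_all [pvALoop, pvFindTail, pvKept, pvALoop_false]
    · by_cases he : PySem.Str.strip line = ""
      · simp_all [pvALoop, pvFindTail, pvKept]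
      · by_cases h1 : PySem.Str.isIn "This is amulecmd" line = true
        · simp_all [pvALoop, pvFindTail, pvKept]
        · by_cases h2 : PySem.Str.isIn "Creating client" line = true
          · simp_all [pvALoop, pvFindTail, pvKept]
          · by_cases h3 : PySem.Str.isIn "Succeeded!" line = true
            · simp_all [pvALoop, pvFindTail, pvKept]
            · by_cases h4 : PySem.Str.isIn "Connection established" line = true
              · simp_all [pvALoop, pvFindTail, pvKept]
              · by_cases h5 : PySem.Str.strip line = "---"
                · simp_all [pvALoop, pvFindTail, pvKept]
                · simp_all [pvALoop, pvFindTail, pvKept, pvALoop_false]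

-- ===== VERDICT (by name: the statement is the Claim_ definition above) =====
theorem clean_amulecmd_output_py_spec : Claim_equal_clean_amulecmd_output_py := by
  intro output _
  unfold Spec_clean_amulecmd_output_py clean_amulecmd_output_py clean_amulecmd_output_py_alt
  rw [pvALoop_eq_findTail]
  cases h : pvFindTail (((PySem.Str.split? output "\n").getD [])) with
  | none => simp [Option.getD]; decide
  | some tail => simp [Option.getD]
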